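-- pv_equiv track=rewrite | github.com/Jhansen19/Raichu_Game | raichu.py | calculate_capture_score
-- ===== SOURCE A (Python) =====
-- CAPTURE_BONUS = 10  # You can adjust this value as per your game's strategy
--
-- def calculate_capture_score(captured_pieces, player):
--     score = 0
--     if player == 'w':
--         # Calculate the score for all pieces captured by 'w' player
--         for piece, count in captured_pieces.items():
--             if piece in ['b', 'B', '$']:  # Pieces that 'w' player can capture
--                 score += count * CAPTURE_BONUS
--     else:
--         # Calculate the score for all pieces captured by 'b' player
--         for piece, count in captured_pieces.items():
--             if piece in ['w', 'W', 'Q']:  # Pieces that 'b' player can capture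
--                 score -= count * CAPTURE_BONUS
--
--     return score
-- ===== SOURCE B (Python) =====
-- CAPTURE_BONUS = 10  # You can adjust this value as per your game's strategy
--
-- def calculate_capture_score(captured_pieces, player):
--     # Direct lookups of the three capturable piece kinds instead of scanning every entry.
--     keys, sign = (['b', 'B', '$'], 1) if player == 'w' else (['w', 'W', 'Q'], -1)
--     return sign * CAPTURE_BONUS * sum(captured_pieces.get(k, 0) for k in keys)
-- ===== Notes on version B (the rewrite author's own statement) =====
-- stated objective: idiomatic
-- what changed: Instead of iterating over every entry of captured_pieces and filtering by membership in a three-element list, B picks the player's key triple and sign once and sums three direct dict lookups with .get(k, 0).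
import Mathlib
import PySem

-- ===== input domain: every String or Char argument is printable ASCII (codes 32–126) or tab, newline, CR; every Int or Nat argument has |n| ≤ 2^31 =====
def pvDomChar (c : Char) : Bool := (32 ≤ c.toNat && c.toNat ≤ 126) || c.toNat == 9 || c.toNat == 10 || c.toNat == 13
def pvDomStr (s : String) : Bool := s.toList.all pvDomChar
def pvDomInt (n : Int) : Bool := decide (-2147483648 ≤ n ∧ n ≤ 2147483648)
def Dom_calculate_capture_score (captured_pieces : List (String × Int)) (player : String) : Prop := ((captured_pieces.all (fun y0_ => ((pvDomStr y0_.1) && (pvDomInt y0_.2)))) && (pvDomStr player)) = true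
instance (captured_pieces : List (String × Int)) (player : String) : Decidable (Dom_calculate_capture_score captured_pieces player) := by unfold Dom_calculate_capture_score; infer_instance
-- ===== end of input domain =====

-- B replaces A's scan over all dict entries (filtered by list membership) with three direct
-- .get lookups on the player's fixed key triple and a sign: a more idiomatic formulation.

def CAPTURE_BONUS : Int := 10

-- ===== PORT A =====
def calculate_capture_score (captured_pieces : List (String × Int)) (player : String) : Int :=
  if player = "w" then
    captured_pieces.foldl
      (fun score pc => if pc.1 ∈ (["b", "B", "$"] : List String) then score + pc.2 * CAPTURE_BONUS else score) 0
  else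
    captured_pieces.foldl
      (fun score pc => if pc.1 ∈ (["w", "W", "Q"] : List String) then score - pc.2 * CAPTURE_BONUS else score) 0

-- ===== PORT B =====
def calculate_capture_score_alt (captured_pieces : List (String × Int)) (player : String) : Int :=
  let ks : List String × Int := if player = "w" then (["b", "B", "$"], 1) else (["w", "W", "Q"], -1)
  ks.2 * CAPTURE_BONUS *
    (ks.1.foldl (fun acc k => acc + (PySem.Dict.mk captured_pieces).getD k 0) 0)

-- ===== PRECONDITION & SPEC =====
-- Pre_ excludes association lists with duplicate keys: those do not correspond to any Python
-- dict (dict keys are unique), so the assoc-list reading of such an input is ambiguous.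
def Pre_calculate_capture_score (captured_pieces : List (String × Int)) (player : String) : Prop :=
  (captured_pieces.map Prod.fst).Nodup

instance (captured_pieces : List (String × Int)) (player : String) : Decidable (Pre_calculate_capture_score captured_pieces player) := by unfold Pre_calculate_capture_score; infer_instance

def pvWitness_calculate_capture_score : (List (String × Int)) × String :=
  ([("b", 3), ("W", 2), ("$", 1)], "w")

def Spec_calculate_capture_score (captured_pieces : List (String × Int)) (player : String) (out : Int) : Prop := out = calculate_capture_score_alt captured_pieces player
instance (captured_pieces : List (String × Int)) (player : String) (out : Int) : Decidable (Spec_calculate_capture_score captured_pieces player out) := by unfold Spec_calculate_capture_score; infer_instance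

-- ===== CLAIM (what is proved, stated in full; the proofs are below) =====
def Claim_equal_calculate_capture_score : Prop := ∀ (captured_pieces : List (String × Int)) (player : String), Dom_calculate_capture_score captured_pieces player → Pre_calculate_capture_score captured_pieces player → Spec_calculate_capture_score captured_pieces player (calculate_capture_score captured_pieces player)

-- ===== LEMMAS AND PROOFS =====

-- a fold whose step is translation-equivariant can start from 0
theorem pv_foldl_shift (f : Int → (String × Int) → Int)
    (hf : ∀ a b x, f (a + b) x = a + f b x) :
    ∀ (l : List (String × Int)) (s : Int), l.foldl f s = s + l.foldl f 0 := by
  intro l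
  induction l with
  | nil => intro s; simp
  | cons x t ih =>
    intro s
    have hx : f s x = s + f 0 x := by
      have := hf s 0 x; simpa using this
    simp only [List.foldl_cons]
    rw [ih (f s x), ih (f 0 x), hx]
    ring

theorem pv_getD_mk_cons (p : String) (c : Int) (t : List (String × Int)) (k : String) :
    (PySem.Dict.mk ((p, c) :: t)).getD k 0 = if p = k then c else (PySem.Dict.mk t).getD k 0 := by
  simp [PySem.Dict.getD_eq_get?_getD, PySem.Dict.get?_mk_cons]
  split_ifs <;> simp

theorem pv_getD_not_mem (l : List (String × Int)) (k : String)
    (h : k ∉ l.map Prod.fst) : (PySem.Dict.mk l).getD k 0 = 0 := by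
  induction l with
  | nil => simp [PySem.Dict.getD_eq_get?_getD, PySem.Dict.get?]
  | cons x t ih =>
    obtain ⟨p, c⟩ := x
    simp only [List.map_cons, List.mem_cons, not_or] at h
    rw [pv_getD_mk_cons, if_neg (fun hpk : p = k => h.1 hpk.symm)]
    exact ih h.2

theorem pv_branch_add (k1 k2 k3 : String)
    (h12 : k1 ≠ k2) (h13 : k1 ≠ k3) (h23 : k2 ≠ k3) :
    ∀ (l : List (String × Int)), (l.map Prod.fst).Nodup →
      l.foldl (fun score pc => if pc.1 ∈ ([k1, k2, k3] : List String) then score + pc.2 * CAPTURE_BONUS else score) 0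
        = CAPTURE_BONUS * ((PySem.Dict.mk l).getD k1 0 + (PySem.Dict.mk l).getD k2 0 + (PySem.Dict.mk l).getD k3 0) := by
  intro l
  induction l with
  | nil => simp [PySem.Dict.getD_eq_get?_getD, PySem.Dict.get?]
  | cons x t ih =>
    intro hnd
    obtain ⟨p, c⟩ := x
    simp only [List.map_cons, List.nodup_cons] at hnd
    have hshift := pv_foldl_shift
      (fun score pc => if pc.1 ∈ ([k1, k2, k3] : List String) then score + pc.2 * CAPTURE_BONUS else score)
      (by intro a b x; by_cases h : x.1 ∈ ([k1, k2, k3] : List String) <;> simp [h] <;> ring)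
    simp only [List.foldl_cons]
    rw [hshift, ih hnd.2]
    rw [pv_getD_mk_cons p c t k1, pv_getD_mk_cons p c t k2, pv_getD_mk_cons p c t k3]
    by_cases h1 : p = k1
    · subst h1
      have := pv_getD_not_mem t p hnd.1
      simp [h12, h13, this]
      ring
    · by_cases h2 : p = k2
      · subst h2
        have := pv_getD_not_mem t p hnd.1
        simp [Ne.symm h12, h23, this, h1]
        ring
      · by_cases h3 : p = k3
        · subst h3
          have := pv_getD_not_mem t p hnd.1
          simp [Ne.symm h13, Ne.symm h23, this, h1, h2]
          ring
        · simp [h1, h2, h3]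

theorem pv_branch_sub (k1 k2 k3 : String)
    (h12 : k1 ≠ k2) (h13 : k1 ≠ k3) (h23 : k2 ≠ k3) :
    ∀ (l : List (String × Int)), (l.map Prod.fst).Nodup →
      l.foldl (fun score pc => if pc.1 ∈ ([k1, k2, k3] : List String) then score - pc.2 * CAPTURE_BONUS else score) 0
        = -(CAPTURE_BONUS * ((PySem.Dict.mk l).getD k1 0 + (PySem.Dict.mk l).getD k2 0 + (PySem.Dict.mk l).getD k3 0)) := by
  intro l
  induction l with
  | nil => simp [PySem.Dict.getD_eq_get?_getD, PySem.Dict.get?]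
  | cons x t ih =>
    intro hnd
    obtain ⟨p, c⟩ := x
    simp only [List.map_cons, List.nodup_cons] at hnd
    have hshift := pv_foldl_shift
      (fun score pc => if pc.1 ∈ ([k1, k2, k3] : List String) then score - pc.2 * CAPTURE_BONUS else score)
      (by intro a b x; by_cases h : x.1 ∈ ([k1, k2, k3] : List String) <;> simp [h] <;> ring)
    simp only [List.foldl_cons]
    rw [hshift, ih hnd.2]
    rw [pv_getD_mk_cons p c t k1, pv_getD_mk_cons p c t k2, pv_getD_mk_cons p c t k3]
    by_cases h1 : p = k1
    · subst h1
      have := pv_getD_not_mem t p hnd.1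
      simp [h12, h13, this]
      ring
    · by_cases h2 : p = k2
      · subst h2
        have := pv_getD_not_mem t p hnd.1
        simp [Ne.symm h12, h23, this, h1]
        ring
      · by_cases h3 : p = k3
        · subst h3
          have := pv_getD_not_mem t p hnd.1
          simp [Ne.symm h13, Ne.symm h23, this, h1, h2]
          ring
        · simp [h1, h2, h3]

theorem pv_keys_sum (l : List (String × Int)) (ks : List String) :
    ks.foldl (fun acc k => acc + (PySem.Dict.mk l).getD k 0) 0
      = (ks.map (fun k => (PySem.Dict.mk l).getD k 0)).sum := by
  rw [PySem.List.foldl_add]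
  simp

-- ===== VERDICT (by name: the statement is the Claim_ definition above) =====
theorem calculate_capture_score_spec : Claim_equal_calculate_capture_score := by
  intro captured_pieces player _ hpre
  unfold Spec_calculate_capture_score calculate_capture_score calculate_capture_score_alt
  by_cases hw : player = "w"
  · simp only [hw, if_true, reduceIte]
    rw [pv_branch_add "b" "B" "$" (by decide) (by decide) (by decide) captured_pieces hpre,
        pv_keys_sum]
    simp only [List.map_cons, List.map_nil, List.sum_cons, List.sum_nil]
    ring
  · simp only [if_neg hw]

    rw [pv_branch_sub "w" "W" "Q" (by decide) (by decide) (by decide) captured_pieces hpre,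
        pv_keys_sum]
    simp only [List.map_cons, List.map_nil, List.sum_cons, List.sum_nil]
    ring
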